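-- pv_equiv track=rewrite | github.com/DavidRod1865/HTS-Classifier | backend/src/commodity_rag_search.py | _hts_codes_match
-- ===== SOURCE A (Python) =====
-- def _hts_codes_match(code1, code2):
--     """Check if two HTS codes are the same (ignoring formatting differences)"""
--     if not code1 or not code2:
--         return False
--
--     # Remove all non-digit characters and compare
--     digits1 = ''.join(c for c in str(code1) if c.isdigit())
--     digits2 = ''.join(c for c in str(code2) if c.isdigit())
--
--     # Pad to same length for comparison
--     max_len = max(len(digits1), len(digits2))
--     digits1 = digits1.ljust(max_len, '0')
--     digits2 = digits2.ljust(max_len, '0')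
--
--     return digits1 == digits2
-- ===== SOURCE B (Python) =====
-- def _hts_codes_match(code1, code2):
--     """Check if two HTS codes are the same (ignoring formatting differences)"""
--     if not code1 or not code2:
--         return False
--
--     digits1 = ''.join(c for c in str(code1) if c.isdigit())
--     digits2 = ''.join(c for c in str(code2) if c.isdigit())
--
--     # Compare canonical forms: trailing zeros are insignificant
--     return digits1.rstrip('0') == digits2.rstrip('0')
-- ===== Notes on version B (the rewrite author's own statement) =====
-- stated objective: simpler
-- what changed: Instead of right-padding both digit strings with '0' to the maximum length and comparing, B reduces each digit string to a trailing-zero-free canonical form with rstrip('0') and compares those; no length bookkeeping or padding is maintained.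
import Mathlib
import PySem

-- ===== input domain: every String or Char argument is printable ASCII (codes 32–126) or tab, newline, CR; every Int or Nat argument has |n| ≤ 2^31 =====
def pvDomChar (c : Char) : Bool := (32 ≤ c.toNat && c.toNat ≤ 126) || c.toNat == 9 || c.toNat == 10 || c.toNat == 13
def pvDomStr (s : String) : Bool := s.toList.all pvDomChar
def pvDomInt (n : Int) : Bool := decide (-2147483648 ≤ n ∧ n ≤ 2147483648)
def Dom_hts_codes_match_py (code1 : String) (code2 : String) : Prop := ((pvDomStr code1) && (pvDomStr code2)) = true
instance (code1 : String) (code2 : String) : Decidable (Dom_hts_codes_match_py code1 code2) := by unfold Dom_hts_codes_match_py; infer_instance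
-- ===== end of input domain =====

-- ===== PORT A =====
-- B replaces A's pad-to-max-length comparison with a trailing-zero canonical form (objective: simpler).
-- Port of A. Strings are handled as their char lists; ''.join(genexpr with filter) is the filter,
-- s.ljust(w,'0') with w ≥ len(s) is exactly s ++ replicate (w - len s) '0' (ported by hand, exact here).
def hts_codes_match_py (code1 : String) (code2 : String) : Bool :=
  if code1 = "" || code2 = "" then false
  else
    let digits1 := code1.toList.filter PySem.Chars.isdigit
    let digits2 := code2.toList.filter PySem.Chars.isdigit
    let max_len := max digits1.length digits2.length
    let digits1 := digits1 ++ List.replicate (max_len - digits1.length) '0'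
    let digits2 := digits2 ++ List.replicate (max_len - digits2.length) '0'
    digits1 == digits2

-- ===== PORT B =====
-- rstrip('0') has no PySem primitive; ported by hand as reverse / dropWhile (== '0') / reverse (exact).
def hts_codes_match_py_alt (code1 : String) (code2 : String) : Bool :=
  if code1 = "" || code2 = "" then false
  else
    let digits1 := code1.toList.filter PySem.Chars.isdigit
    let digits2 := code2.toList.filter PySem.Chars.isdigit
    ((digits1.reverse.dropWhile (· == '0')).reverse == (digits2.reverse.dropWhile (· == '0')).reverse)

-- ===== PRECONDITION & SPEC =====
def Spec_hts_codes_match_py (code1 : String) (code2 : String) (out : Bool) : Prop := out = hts_codes_match_py_alt code1 code2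
instance (code1 : String) (code2 : String) (out : Bool) : Decidable (Spec_hts_codes_match_py code1 code2 out) := by unfold Spec_hts_codes_match_py; infer_instance

-- ===== CLAIM (what is proved, stated in full; the proofs are below) =====
def Claim_equal_hts_codes_match_py : Prop := ∀ (code1 : String) (code2 : String), Dom_hts_codes_match_py code1 code2 → Spec_hts_codes_match_py code1 code2 (hts_codes_match_py code1 code2)

-- ===== LEMMAS AND PROOFS =====

-- every list splits as leading-zeros ++ its zero-stripped tail
theorem pv_split_zeros (x : List Char) :
    x = List.replicate (x.length - (x.dropWhile (· == '0')).length) '0' ++ x.dropWhile (· == '0') := by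
  have htw : x.takeWhile (· == '0') = List.replicate (x.takeWhile (· == '0')).length '0' := by
    apply List.eq_replicate_of_mem
    intro c hc
    have := List.mem_takeWhile_imp hc
    simpa using this
  have hlen : x.length = (x.takeWhile (· == '0')).length + (x.dropWhile (· == '0')).length := by
    have h0 := congrArg List.length (List.takeWhile_append_dropWhile (p := (· == '0')) (l := x))
    rw [List.length_append] at h0
    omega
  have : x.length - (x.dropWhile (· == '0')).length = (x.takeWhile (· == '0')).length := by omega
  rw [this, ← htw, List.takeWhile_append_dropWhile]

-- dropping a block of leading zeros before stripping changes nothing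
theorem pv_dropWhile_replicate (n : Nat) (x : List Char) :
    List.dropWhile (· == '0') (List.replicate n '0' ++ x) = List.dropWhile (· == '0') x := by
  induction n with
  | zero => simp
  | succ k ih => simp [List.replicate_succ, List.dropWhile_cons, ih]

-- left-padding with zeros to any width ≥ the length only changes the zero block
theorem pv_pad_eq (x : List Char) (m : Nat) (hm : x.length ≤ m) :
    List.replicate (m - x.length) '0' ++ x =
    List.replicate (m - (x.dropWhile (· == '0')).length) '0' ++ x.dropWhile (· == '0') := by
  have hl : (x.dropWhile (· == '0')).length ≤ x.length := List.length_dropWhile_le _ _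
  have h1 : List.replicate (m - x.length) '0' ++ x
      = List.replicate (m - x.length) '0' ++
        (List.replicate (x.length - (x.dropWhile (· == '0')).length) '0' ++ x.dropWhile (· == '0')) :=
    congrArg _ (pv_split_zeros x)
  rw [h1, ← List.append_assoc, ← List.replicate_add]
  congr 2
  omega

-- left-padding both lists with zeros to the max length preserves/reflects equality of stripped forms
theorem pv_pad_iff (x y : List Char) :
    (List.replicate (max x.length y.length - x.length) '0' ++ x =
     List.replicate (max x.length y.length - y.length) '0' ++ y) ↔
    x.dropWhile (· == '0') = y.dropWhile (· == '0') := by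
  constructor
  · intro h
    have h2 := congrArg (List.dropWhile (· == '0')) h
    simp only [pv_dropWhile_replicate] at h2
    exact h2
  · intro h
    rw [pv_pad_eq x _ (Nat.le_max_left _ _), pv_pad_eq y _ (Nat.le_max_right _ _), h]

-- A's right-pad-to-max comparison equals B's trailing-zero-stripped comparison
theorem pv_main_iff (a b : List Char) :
    (a ++ List.replicate (max a.length b.length - a.length) '0' =
     b ++ List.replicate (max a.length b.length - b.length) '0') ↔
    ((a.reverse.dropWhile (· == '0')).reverse = (b.reverse.dropWhile (· == '0')).reverse) := by
  have key := pv_pad_iff a.reverse b.reverse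
  simp only [List.length_reverse] at key
  constructor
  · intro h
    have h2 := congrArg List.reverse h
    simp only [List.reverse_append, List.reverse_replicate] at h2
    rw [key.mp h2]
  · intro h
    have h3 := key.mpr (List.reverse_inj.mp h)
    have h4 := congrArg List.reverse h3
    simpa [List.reverse_append, List.reverse_replicate] using h4

-- ===== VERDICT (by name: the statement is the Claim_ definition above) =====
theorem hts_codes_match_py_spec : Claim_equal_hts_codes_match_py := by
  intro c1 c2 _
  unfold Spec_hts_codes_match_py hts_codes_match_py hts_codes_match_py_alt
  by_cases h1 : c1 = "" <;> by_cases h2 : c2 = "" <;> simp [h1, h2]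
  exact (pv_main_iff _ _).trans List.reverse_inj
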